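-- pv_equiv track=rewrite | github.com/ohtjqkd/pythoncode | 12100.py | swipe
-- ===== SOURCE A (Python) =====
-- def swipe(lst,N):
--     new_list = [i for i in lst if i]
--     for i in range(len(new_list)-1):
--         if new_list[i] == new_list[i+1]:
--             new_list[i] *= 2
--             new_list[i+1] = 0
--     new_list = [i for i in new_list if i]
--     return new_list + [0] * (N-len(new_list))
-- ===== SOURCE B (Python) =====
-- def swipe(lst, N):
--     tiles = [i for i in lst if i]
--     res = []
--     i = 0
--     n = len(tiles)
--     while i < n:
--         if i + 1 < n and tiles[i] == tiles[i + 1]: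
--             res.append(tiles[i] * 2)
--             i += 2
--         else:
--             res.append(tiles[i])
--             i += 1
--     return res + [0] * (N - len(res))
-- ===== Notes on version B (the rewrite author's own statement) =====
-- stated objective: simpler
-- what changed: Replaces A's index loop that merges by doubling-and-zeroing in place followed by a second zero-filter with a single forward scan over the compacted tiles that appends merged or single tiles directly to the result.
import Mathlib
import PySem

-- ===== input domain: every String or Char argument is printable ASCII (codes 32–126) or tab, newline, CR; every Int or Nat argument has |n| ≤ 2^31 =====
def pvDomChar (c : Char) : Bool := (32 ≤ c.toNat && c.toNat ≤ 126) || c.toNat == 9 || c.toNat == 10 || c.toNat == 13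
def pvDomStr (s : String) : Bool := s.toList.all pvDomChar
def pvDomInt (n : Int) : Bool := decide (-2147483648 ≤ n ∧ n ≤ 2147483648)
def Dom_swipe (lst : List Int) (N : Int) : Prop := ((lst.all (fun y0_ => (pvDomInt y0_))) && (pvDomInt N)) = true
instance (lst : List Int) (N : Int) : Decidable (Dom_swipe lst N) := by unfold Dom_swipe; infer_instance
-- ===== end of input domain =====

-- B replaces A's in-place double-and-zero loop plus second zero-filter with one
-- forward merge-while-scanning pass that builds the output directly (objective: simpler).

-- ===== PORT A =====
def swipeStep (l : List Int) (i : Nat) : List Int :=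
  if l.getD i 0 = l.getD (i + 1) 0 then
    (l.set i (l.getD i 0 * 2)).set (i + 1) 0
  else l

def swipe (lst : List Int) (N : Int) : List Int :=
  let nl := lst.filter (fun i => i != 0)
  let nl2 := (List.range (nl.length - 1)).foldl swipeStep nl
  let nl3 := nl2.filter (fun i => i != 0)
  nl3 ++ List.replicate (N - (nl3.length : Int)).toNat 0

-- ===== PORT B =====
-- B's while-loop with index i advancing by 2 on a merge and 1 otherwise, transcribed
-- as the obvious structural recursion on the remaining tiles.
def mergePass : List Int → List Int
  | [] => []
  | [a] => [a]
  | a :: b :: rest =>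
      if a = b then a * 2 :: mergePass rest
      else a :: mergePass (b :: rest)
termination_by l => l.length

def swipe_alt (lst : List Int) (N : Int) : List Int :=
  let tiles := lst.filter (fun i => i != 0)
  let res := mergePass tiles
  res ++ List.replicate (N - (res.length : Int)).toNat 0

-- ===== PRECONDITION & SPEC =====
def Spec_swipe (lst : List Int) (N : Int) (out : List Int) : Prop := out = swipe_alt lst N
instance (lst : List Int) (N : Int) (out : List Int) : Decidable (Spec_swipe lst N out) := by unfold Spec_swipe; infer_instance

-- ===== CLAIM (what is proved, stated in full; the proofs are below) =====
def Claim_equal_swipe : Prop := ∀ (lst : List Int) (N : Int), Dom_swipe lst N → Spec_swipe lst N (swipe lst N)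

-- ===== LEMMAS AND PROOFS =====

-- structural characterisation of A's index loop
def hLoop : List Int → List Int
  | [] => []
  | [a] => [a]
  | a :: b :: rest =>
      if a = b then a * 2 :: hLoop (0 :: rest)
      else a :: hLoop (b :: rest)
termination_by l => l.length

theorem getD_append_length (pre xs : List Int) (d : Int) :
    (pre ++ xs).getD pre.length d = xs.getD 0 d := by
  induction pre with
  | nil => rfl
  | cons a t ih => simpa using ih

theorem getD_append_length_succ (pre xs : List Int) (d : Int) :
    (pre ++ xs).getD (pre.length + 1) d = xs.getD 1 d := by
  induction pre with
  | nil => rfl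
  | cons a t ih => simpa using ih

theorem set_append_length (pre xs : List Int) (v : Int) :
    (pre ++ xs).set pre.length v = pre ++ xs.set 0 v := by
  induction pre with
  | nil => rfl
  | cons a t ih => simp [ih]

theorem set_append_length_succ (pre xs : List Int) (v : Int) :
    (pre ++ xs).set (pre.length + 1) v = pre ++ xs.set 1 v := by
  induction pre with
  | nil => rfl
  | cons a t ih => simp [ih]

theorem foldl_swipeStep_range' (xs : List Int) :
    ∀ pre : List Int,
      (List.range' pre.length (xs.length - 1)).foldl swipeStep (pre ++ xs) =
        pre ++ hLoop xs := by
  induction xs using hLoop.induct with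
  | case1 =>
      intro pre; simp [hLoop]
  | case2 a =>
      intro pre; simp [hLoop]
  | case3 b rest ih =>
      intro pre
      have hlen : (b :: b :: rest).length - 1 = rest.length + 1 := by simp
      rw [hlen, List.range'_succ, List.foldl_cons]
      have hstep : swipeStep (pre ++ b :: b :: rest) pre.length =
          pre ++ (b * 2) :: 0 :: rest := by
        simp only [swipeStep, getD_append_length, getD_append_length_succ,
          set_append_length, set_append_length_succ]
        simp

      rw [hstep]
      have h := ih (pre ++ [b * 2])
      norm_num at h
      rw [h]
      simp [hLoop]
  | case4 a b rest hab ih =>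
      intro pre
      have hlen : (a :: b :: rest).length - 1 = rest.length + 1 := by simp
      rw [hlen, List.range'_succ, List.foldl_cons]
      have hstep : swipeStep (pre ++ a :: b :: rest) pre.length =
          pre ++ a :: b :: rest := by
        simp only [swipeStep, getD_append_length, getD_append_length_succ]
        simp [hab]
      rw [hstep]
      have h := ih (pre ++ [a])
      norm_num at h
      rw [h]
      simp [hLoop, hab]

theorem filter_hLoop (xs : List Int) (hxs : ∀ x ∈ xs, x ≠ 0) :
    (hLoop xs).filter (fun i => i != 0) = mergePass xs := by
  induction xs using mergePass.induct with
  | case1 => simp [hLoop, mergePass]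
  | case2 a =>
      have := hxs a (by simp)
      simp [hLoop, mergePass, this]
  | case3 b rest ih =>
      have hb : b ≠ 0 := hxs b (by simp)
      have hb2 : b * 2 ≠ 0 := by intro h; exact hb (by omega)
      have hrest : ∀ x ∈ rest, x ≠ 0 := fun x hx => hxs x (by simp [hx])
      rw [show hLoop (b :: b :: rest) = b * 2 :: hLoop (0 :: rest) from by
            simp [hLoop],
          show mergePass (b :: b :: rest) = b * 2 :: mergePass rest from by
            simp [mergePass]]
      rw [List.filter_cons_of_pos (by simpa using hb2)]
      congr 1
      cases rest with
      | nil => simp [hLoop, mergePass]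
      | cons c r =>
          have hc : c ≠ 0 := hrest c (by simp)
          rw [show hLoop (0 :: c :: r) = 0 :: hLoop (c :: r) from by
                simp [hLoop, hc.symm]]
          rw [List.filter_cons_of_neg (by simp)]
          exact ih hrest
  | case4 a b rest hab ih =>
      have ha : a ≠ 0 := hxs a (by simp)
      have hrest : ∀ x ∈ b :: rest, x ≠ 0 := fun x hx => hxs x (by simp at hx ⊢; tauto)
      rw [show hLoop (a :: b :: rest) = a :: hLoop (b :: rest) from by
            simp [hLoop, hab],
          show mergePass (a :: b :: rest) = a :: mergePass (b :: rest) from by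
            simp [mergePass, hab]]
      rw [List.filter_cons_of_pos (by simpa using ha)]
      congr 1
      exact ih hrest

-- ===== VERDICT (by name: the statement is the Claim_ definition above) =====
theorem swipe_spec : Claim_equal_swipe := by
  intro lst N _
  unfold Spec_swipe swipe swipe_alt
  have hnz : ∀ x ∈ lst.filter (fun i => i != 0), x ≠ 0 := by
    intro x hx
    simpa using (List.mem_filter.mp hx).2
  have hfold := foldl_swipeStep_range' (lst.filter (fun i => i != 0)) []
  simp only [List.length_nil, List.nil_append] at hfold
  rw [← List.range_eq_range'] at hfold
  simp only [hfold, filter_hLoop _ hnz]
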